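-- pv_equiv track=rewrite | github.com/MrBrantCode/unitest_baseline | mut_generate/mist_train_cf/cf_46661/solution.py | largest_smallest_integers
-- ===== SOURCE A (Python) =====
-- def largest_smallest_integers(lst):
--     highest_neg_even = highest_non_neg_even = smallest_neg_even = smallest_non_neg_even = smallest_neg_odd = highest_non_neg_odd = None
--
--     for num in lst:
--         if num%2 == 0:
--             if num < 0:
--                 if highest_neg_even is None or highest_neg_even < num:
--                     highest_neg_even = num
--                 if smallest_neg_even is None or smallest_neg_even > num:
--                     smallest_neg_even = num
--             else:
--                 if highest_non_neg_even is None or highest_non_neg_even < num: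
--                     highest_non_neg_even = num
--                 if smallest_non_neg_even is None or smallest_non_neg_even > num:
--                     smallest_non_neg_even = num
--         else:
--             if num < 0:
--                 if smallest_neg_odd is None or smallest_neg_odd > num:
--                     smallest_neg_odd = num
--             else:
--                 if highest_non_neg_odd is None or highest_non_neg_odd < num:
--                     highest_non_neg_odd = num
--
--     return (highest_neg_even, highest_non_neg_even, smallest_neg_even, smallest_non_neg_even, smallest_neg_odd, highest_non_neg_odd)
-- ===== SOURCE B (Python) =====
-- def largest_smallest_integers(lst):
--     neg_even = [num for num in lst if num % 2 == 0 and num < 0]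
--     nonneg_even = [num for num in lst if num % 2 == 0 and not num < 0]
--     neg_odd = [num for num in lst if num % 2 != 0 and num < 0]
--     nonneg_odd = [num for num in lst if num % 2 != 0 and not num < 0]
--     return (max(neg_even, default=None),
--             max(nonneg_even, default=None),
--             min(neg_even, default=None),
--             min(nonneg_even, default=None),
--             min(neg_odd, default=None),
--             max(nonneg_odd, default=None))
-- ===== Notes on version B (the rewrite author's own statement) =====
-- stated objective: simpler
-- what changed: Replaced the single fused guarded loop over six accumulators by four filtered partitions (parity x sign) followed by library max/min reductions with default=None.
import Mathlib
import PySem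

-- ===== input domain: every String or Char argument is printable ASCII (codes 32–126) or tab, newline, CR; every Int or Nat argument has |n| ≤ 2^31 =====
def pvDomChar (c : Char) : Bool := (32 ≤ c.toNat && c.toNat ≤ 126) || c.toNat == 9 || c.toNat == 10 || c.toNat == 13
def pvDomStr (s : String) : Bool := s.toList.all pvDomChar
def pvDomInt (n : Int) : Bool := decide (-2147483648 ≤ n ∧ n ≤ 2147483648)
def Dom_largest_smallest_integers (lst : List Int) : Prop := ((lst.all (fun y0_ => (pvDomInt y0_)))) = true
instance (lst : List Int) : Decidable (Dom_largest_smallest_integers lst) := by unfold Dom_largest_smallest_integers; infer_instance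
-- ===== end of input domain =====

-- B is a simpler decomposition: four filtered partitions then max/min reductions (return value only; no speed claim).

-- ===== PORT A =====
-- 'if highest is None or highest < num: highest = num'
def pvUpdMax (s : Option Int) (n : Int) : Option Int :=
  match s with
  | none => some n
  | some m => if m < n then some n else some m

-- 'if smallest is None or smallest > num: smallest = num'
def pvUpdMin (s : Option Int) (n : Int) : Option Int :=
  match s with
  | none => some n
  | some m => if m > n then some n else some m

-- the for-loop over the six accumulators, in A's branch order
def pvLoopA (l : List Int) (a b c d e f : Option Int) :
    Option Int × Option Int × Option Int × Option Int × Option Int × Option Int :=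
  match l with
  | [] => (a, b, c, d, e, f)
  | n :: t =>
    if PySem.Int.mod n 2 = 0 then
      if n < 0 then pvLoopA t (pvUpdMax a n) b (pvUpdMin c n) d e f
      else pvLoopA t a (pvUpdMax b n) c (pvUpdMin d n) e f
    else
      if n < 0 then pvLoopA t a b c d (pvUpdMin e n) f
      else pvLoopA t a b c d e (pvUpdMax f n)

def largest_smallest_integers (lst : List Int) :
    Option Int × Option Int × Option Int × Option Int × Option Int × Option Int :=
  pvLoopA lst none none none none none none

-- ===== PORT B =====
def largest_smallest_integers_alt (lst : List Int) :
    Option Int × Option Int × Option Int × Option Int × Option Int × Option Int :=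
  let negEven := lst.filter (fun n => PySem.Int.mod n 2 == 0 && n < 0)
  let nonnegEven := lst.filter (fun n => PySem.Int.mod n 2 == 0 && !(n < 0))
  let negOdd := lst.filter (fun n => PySem.Int.mod n 2 != 0 && n < 0)
  let nonnegOdd := lst.filter (fun n => PySem.Int.mod n 2 != 0 && !(n < 0))
  (PySem.List.max? negEven (fun x => x),
   PySem.List.max? nonnegEven (fun x => x),
   PySem.List.min? negEven (fun x => x),
   PySem.List.min? nonnegEven (fun x => x),
   PySem.List.min? negOdd (fun x => x),
   PySem.List.max? nonnegOdd (fun x => x))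

-- ===== PRECONDITION & SPEC =====
def Spec_largest_smallest_integers (lst : List Int) (out : Option Int × Option Int × Option Int × Option Int × Option Int × Option Int) : Prop := out = largest_smallest_integers_alt lst
instance (lst : List Int) (out : Option Int × Option Int × Option Int × Option Int × Option Int × Option Int) : Decidable (Spec_largest_smallest_integers lst out) := by unfold Spec_largest_smallest_integers; infer_instance

-- ===== CLAIM (what is proved, stated in full; the proofs are below) =====
def Claim_equal_largest_smallest_integers : Prop := ∀ (lst : List Int), Dom_largest_smallest_integers lst → Spec_largest_smallest_integers lst (largest_smallest_integers lst)

-- ===== LEMMAS AND PROOFS =====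

theorem pvUpdMax_eq_max (x y : Int) : pvUpdMax (some x) y = some (max x y) := by
  simp only [pvUpdMax]
  rcases lt_or_ge x y with h | h
  · simp [h, max_eq_right h.le]
  · simp [not_lt.2 h, max_eq_left h]

theorem pvUpdMin_eq_min (x y : Int) : pvUpdMin (some x) y = some (min x y) := by
  simp only [pvUpdMin]
  rcases lt_or_ge y x with h | h
  · simp [h, min_eq_right h.le]
  · simp [not_lt.2 h, min_eq_left h]

theorem foldl_pvUpdMax_some (t : List Int) : ∀ x : Int,
    t.foldl pvUpdMax (some x) = some (t.foldl max x) := by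
  induction t with
  | nil => intro x; rfl
  | cons y t ih => intro x; simp [List.foldl, pvUpdMax_eq_max, ih]

theorem foldl_pvUpdMin_some (t : List Int) : ∀ x : Int,
    t.foldl pvUpdMin (some x) = some (t.foldl min x) := by
  induction t with
  | nil => intro x; rfl
  | cons y t ih => intro x; simp [List.foldl, pvUpdMin_eq_min, ih]

theorem foldl_pvUpdMax_none (xs : List Int) :
    xs.foldl pvUpdMax none = PySem.List.max? xs (fun x => x) := by
  cases xs with
  | nil => rfl
  | cons x t =>
    simp [List.foldl, pvUpdMax, PySem.List.max?_id_cons, foldl_pvUpdMax_some]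

theorem foldl_pvUpdMin_none (xs : List Int) :
    xs.foldl pvUpdMin none = PySem.List.min? xs (fun x => x) := by
  cases xs with
  | nil => rfl
  | cons x t =>
    simp [List.foldl, pvUpdMin, PySem.List.min?_id_cons, foldl_pvUpdMin_some]

theorem pvLoopA_eq (l : List Int) : ∀ a b c d e f,
    pvLoopA l a b c d e f =
      ((l.filter (fun n => PySem.Int.mod n 2 == 0 && n < 0)).foldl pvUpdMax a,
       (l.filter (fun n => PySem.Int.mod n 2 == 0 && !(n < 0))).foldl pvUpdMax b,
       (l.filter (fun n => PySem.Int.mod n 2 == 0 && n < 0)).foldl pvUpdMin c,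
       (l.filter (fun n => PySem.Int.mod n 2 == 0 && !(n < 0))).foldl pvUpdMin d,
       (l.filter (fun n => PySem.Int.mod n 2 != 0 && n < 0)).foldl pvUpdMin e,
       (l.filter (fun n => PySem.Int.mod n 2 != 0 && !(n < 0))).foldl pvUpdMax f) := by
  induction l with
  | nil => intro a b c d e f; rfl
  | cons n t ih =>
    intro a b c d e f
    by_cases h2 : (2:Int) ∣ n <;> by_cases hn : n < 0 <;>
      simp [pvLoopA, h2, hn, ih]

-- ===== VERDICT (by name: the statement is the Claim_ definition above) =====
theorem largest_smallest_integers_spec : Claim_equal_largest_smallest_integers := by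
  intro lst _
  unfold Spec_largest_smallest_integers largest_smallest_integers largest_smallest_integers_alt
  simp only [pvLoopA_eq, foldl_pvUpdMax_none, foldl_pvUpdMin_none]
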